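-- pv_equiv track=rewrite | github.com/dantetemplar/competitive-programming | Codeforces - Codeforces Round 1056 (Div. 2)/C_Плащи_древних_волшебников.py | compute_a
-- ===== SOURCE A (Python) =====
-- def compute_a(seq):
--     n = len(seq)
--     prefR = 0
--     sufL = seq.count('L')
--     res = []
--     for i, c in enumerate(seq):
--         if c == 'R':
--             prefR += 1
--         res.append(prefR + sufL)
--         if c == 'L':
--             sufL -= 1
--     return res
-- ===== SOURCE B (Python) =====
-- def compute_a(seq):
--     # Two table-building passes (inclusive prefix-'R' counts and inclusive
--     # suffix-'L' counts) combined elementwise, instead of one fused online loop.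
--     prefR = []
--     r = 0
--     for c in seq:
--         if c == 'R':
--             r += 1
--         prefR.append(r)
--     sufL = []
--     l = 0
--     for c in reversed(seq):
--         if c == 'L':
--             l += 1
--         sufL.append(l)
--     sufL.reverse()
--     return [p + s for p, s in zip(prefR, sufL)]
-- ===== Notes on version B (the rewrite author's own statement) =====
-- stated objective: alternative
-- what changed: Replaces A's single fused loop carrying two running counters with two explicit table-building passes (a left-to-right inclusive prefix-'R' table and a right-to-left inclusive suffix-'L' table) combined by an elementwise zip.
import Mathlib
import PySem

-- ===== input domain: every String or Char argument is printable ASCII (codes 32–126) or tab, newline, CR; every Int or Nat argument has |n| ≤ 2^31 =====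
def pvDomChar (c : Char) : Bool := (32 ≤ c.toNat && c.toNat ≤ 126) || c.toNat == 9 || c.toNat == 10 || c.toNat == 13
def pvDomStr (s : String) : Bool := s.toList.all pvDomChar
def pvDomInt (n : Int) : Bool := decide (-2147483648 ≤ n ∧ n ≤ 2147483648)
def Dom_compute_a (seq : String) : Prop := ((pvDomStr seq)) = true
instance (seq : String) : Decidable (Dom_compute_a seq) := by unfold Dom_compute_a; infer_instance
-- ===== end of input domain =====

-- B rebuilds the result from an explicit prefix-'R' table and suffix-'L' table combined by zipWith, instead of A's fused loop over two running counters.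


-- ===== PORT A =====
-- the for-loop of A: state (prefR, sufL); increment before append, decrement after
def computeALoop : List Char → Int → Int → List Int
  | [], _, _ => []
  | c :: cs, prefR, sufL =>
    let prefR' := if c = 'R' then prefR + 1 else prefR
    (prefR' + sufL) :: computeALoop cs prefR' (if c = 'L' then sufL - 1 else sufL)

def compute_a (seq : String) : List Int :=
  computeALoop seq.toList 0 (PySem.Str.count seq "L" : Int)   -- seq.count('L')

-- ===== PORT B =====
-- first pass of B: inclusive prefix-'R' counts
def altPref : List Char → Int → List Int
  | [], _ => []
  | c :: cs, r =>
    let r' := if c = 'R' then r + 1 else r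
    r' :: altPref cs r'

-- second pass of B: running 'L' counts over the reversed string (reversed back afterwards)
def altSufRev : List Char → Int → List Int
  | [], _ => []
  | c :: cs, l =>
    let l' := if c = 'L' then l + 1 else l
    l' :: altSufRev cs l'

def compute_a_alt (seq : String) : List Int :=
  List.zipWith (· + ·) (altPref seq.toList 0) ((altSufRev seq.toList.reverse 0).reverse)

-- ===== PRECONDITION & SPEC =====
def Spec_compute_a (seq : String) (out : List Int) : Prop := out = compute_a_alt seq
instance (seq : String) (out : List Int) : Decidable (Spec_compute_a seq out) := by unfold Spec_compute_a; infer_instance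

-- ===== CLAIM (what is proved, stated in full; the proofs are below) =====
def Claim_equal_compute_a : Prop := ∀ (seq : String), Dom_compute_a seq → Spec_compute_a seq (compute_a seq)

-- ===== LEMMAS AND PROOFS =====

-- proof-side characterisation of B's suffix table: entry i = l + (count of 'L' in the suffix from i)
def sufTab : List Char → Int → List Int
  | [], _ => []
  | c :: cs, l => (l + ((c :: cs).count 'L' : Int)) :: sufTab cs l

theorem sufTab_append_singleton (c : Char) (xs : List Char) (l : Int) :
    sufTab (xs ++ [c]) l
      = sufTab xs (if c = 'L' then l + 1 else l) ++ [if c = 'L' then l + 1 else l] := by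
  induction xs generalizing l with
  | nil => simp [sufTab, List.count_cons]; split_ifs <;> simp
  | cons x xs ih =>
    simp only [List.cons_append, sufTab, ih]
    congr 1
    simp [List.count_append, List.count_cons]
    split_ifs <;> ring

theorem altSufRev_reverse (rs : List Char) (l : Int) :
    (altSufRev rs l).reverse = sufTab rs.reverse l := by
  induction rs generalizing l with
  | nil => simp [altSufRev, sufTab]
  | cons c cs ih =>
    simp only [altSufRev, List.reverse_cons, sufTab_append_singleton, ih]

theorem computeALoop_eq_zip (cs : List Char) (prefR l : Int) :
    computeALoop cs prefR (l + (cs.count 'L' : Int))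
      = List.zipWith (· + ·) (altPref cs prefR) (sufTab cs l) := by
  induction cs generalizing prefR l with
  | nil => simp [computeALoop, altPref, sufTab]
  | cons c cs ih =>
    simp only [computeALoop, altPref, sufTab, List.zipWith_cons_cons]
    congr 1
    have h : (if c = 'L' then l + ((c :: cs).count 'L' : Int) - 1
                 else l + ((c :: cs).count 'L' : Int)) = l + (cs.count 'L' : Int) := by
      simp [List.count_cons]
      split_ifs <;> ring
    rw [h, ih]

-- single-character str.count agrees with the character count of the list
theorem count_go_single (c : Char) (l : List Char) (acc : Nat) :
    PySem.Chars.count.go [c] l.length l acc = acc + l.count c := by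
  induction l generalizing acc with
  | nil => simp [PySem.Chars.count.go]
  | cons h t ih =>
    rw [List.length_cons, PySem.Chars.count.go]
    by_cases hch : c = h
    · subst hch
      have hp : [c].isPrefixOf (c :: t) = true := by simp [List.isPrefixOf]
      simp [hp, ih]
      omega
    · have hp : [c].isPrefixOf (h :: t) = false := by
        simp [List.isPrefixOf]
        exact hch
      simp [hp, ih, List.count_cons]
      exact fun he => hch he.symm

theorem str_count_single (s : String) :
    PySem.Str.count s "L" = s.toList.count 'L' := by
  rw [PySem.Str.count_eq]
  show PySem.Chars.count s.toList ['L'] = s.toList.count 'L'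
  rw [PySem.Chars.count]
  simpa using count_go_single 'L' s.toList 0

-- ===== VERDICT (by name: the statement is the Claim_ definition above) =====
theorem compute_a_spec : Claim_equal_compute_a := by
  intro seq _
  show compute_a seq = compute_a_alt seq
  unfold compute_a compute_a_alt
  rw [str_count_single, altSufRev_reverse, List.reverse_reverse]
  have := computeALoop_eq_zip seq.toList 0 0
  simpa using this
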